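-- pv_equiv track=rewrite | github.com/batzorich/Mongolian-OCR | src/post_process.py | convert_to_lower
-- ===== SOURCE A (Python) =====
-- def convert_to_lower(text):
--     def is_valid(s):
--         return len(s) > 2 and sum(c.isupper() for c in s[1:]) >= 1 and s[0].islower() and sum(c.islower() for c in s[1:]) >= 1
--
--     lines = text.split('\n')
--     result = []
--     for line in lines:
--         words = line.split(' ')
--         fixed_words = []
--         for w in words:
--             if is_valid(w):
--                 w = w.lower()
--             fixed_words.append(w)
--         result.append(' '.join(fixed_words))
--     return '\n'.join(result)
-- ===== SOURCE B (Python) =====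
-- def convert_to_lower(text):
--     # One left-to-right pass over the text: copy separator characters (' ', '\n')
--     # unchanged, and for each maximal run of non-separator characters (a "word")
--     # emit its lowercase form when it matches the mixed-case pattern.
--     def is_valid(s):
--         return len(s) > 2 and sum(c.isupper() for c in s[1:]) >= 1 and s[0].islower() and sum(c.islower() for c in s[1:]) >= 1
--
--     out = []
--     i = 0
--     n = len(text)
--     while i < n:
--         c = text[i]
--         if c == ' ' or c == '\n':
--             out.append(c)
--             i += 1
--         else:
--             j = i
--             while j < n and text[j] != ' ' and text[j] != '\n':
--                 j += 1
--             w = text[i:j]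
--             out.append(w.lower() if is_valid(w) else w)
--             i = j
--     return ''.join(out)
-- ===== Notes on version B (the rewrite author's own statement) =====
-- stated objective: alternative
-- what changed: Replaces A's split-into-lines/split-into-words/rejoin passes with a single left-to-right scan that copies separator characters and rewrites each maximal non-separator run in place.
import Mathlib
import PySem

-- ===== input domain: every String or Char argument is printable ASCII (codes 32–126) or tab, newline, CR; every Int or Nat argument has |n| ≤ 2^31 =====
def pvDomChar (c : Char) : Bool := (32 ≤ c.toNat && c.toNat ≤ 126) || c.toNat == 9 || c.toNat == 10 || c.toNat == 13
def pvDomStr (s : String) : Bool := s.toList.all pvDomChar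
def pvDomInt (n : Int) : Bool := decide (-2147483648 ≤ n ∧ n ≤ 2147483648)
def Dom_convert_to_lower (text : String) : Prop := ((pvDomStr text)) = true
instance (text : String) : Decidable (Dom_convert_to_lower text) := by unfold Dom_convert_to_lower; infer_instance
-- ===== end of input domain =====

-- B replaces A's split-lines/split-words/rejoin passes with a single left-to-right scan
-- over the characters (objective: alternative; same O(n) cost).

-- shared helper: both Pythons define the identical `is_valid`, and both apply
-- `w.lower() if is_valid(w) else w` to a word
def pvIsValid (s : List Char) : Bool :=
  decide (s.length > 2) &&
  decide (1 ≤ (PySem.Chars.slice s (some 1) none).countP (fun c => PySem.Chars.isupper c)) &&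
  (match s with | [] => false | c :: _ => PySem.Chars.islower c) &&
  decide (1 ≤ (PySem.Chars.slice s (some 1) none).countP (fun c => PySem.Chars.islower c))

def pvFix (w : List Char) : List Char :=
  if pvIsValid w then PySem.Chars.lower w else w

-- ===== PORT A =====
-- `' '.join(fixed_words)` over `line.split(' ')` with the per-word fix
def pvConvLine (l : List Char) : List Char :=
  PySem.Chars.join [' '] ((PySem.Chars.splitOn l [' ']).map pvFix)

def convert_to_lower (text : String) : String :=
  String.ofList (PySem.Chars.join ['\n'] ((PySem.Chars.splitOn text.toList ['\n']).map pvConvLine))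

-- ===== PORT B =====
-- one pass: separator characters are copied, a maximal non-separator run is fixed as a word
def pvIsSep (c : Char) : Bool := c == ' ' || c == '\n'

def pvScan : List Char → List Char
  | [] => []
  | c :: cs =>
    if pvIsSep c then c :: pvScan cs
    else pvFix (c :: cs.takeWhile (fun x => !pvIsSep x)) ++ pvScan (cs.dropWhile (fun x => !pvIsSep x))
termination_by cs => cs.length
decreasing_by
  all_goals (have := List.length_dropWhile_le (p := fun x => !pvIsSep x) (l := cs); simp; try omega)

def convert_to_lower_alt (text : String) : String := String.ofList (pvScan text.toList)

-- ===== PRECONDITION & SPEC =====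
def Spec_convert_to_lower (text : String) (out : String) : Prop := out = convert_to_lower_alt text
instance (text : String) (out : String) : Decidable (Spec_convert_to_lower text out) := by unfold Spec_convert_to_lower; infer_instance

-- ===== CLAIM (what is proved, stated in full; the proofs are below) =====
def Claim_equal_convert_to_lower : Prop := ∀ (text : String), Dom_convert_to_lower text → Spec_convert_to_lower text (convert_to_lower text)

-- ===== LEMMAS AND PROOFS =====

def pvPsplit (d : Char) : List Char → List (List Char)
  | [] => [[]]
  | c :: cs => if c = d then [] :: pvPsplit d cs else (pvPsplit d cs).modifyHead (c :: ·)

lemma pvPsplit_ne_nil (d : Char) (cs : List Char) : pvPsplit d cs ≠ [] := by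
  induction cs with
  | nil => simp [pvPsplit]
  | cons c cs ih =>
    simp only [pvPsplit]
    split
    · simp
    · cases h : pvPsplit d cs with
      | nil => exact absurd h ih
      | cons a t => simp [h]

lemma pvGo_eq (d : Char) : ∀ (fuel : Nat) (l cur : List Char) (acc : List (List Char)),
    l.length < fuel →
    PySem.Chars.splitOn.go [d] fuel l cur acc
      = acc.reverse ++ (pvPsplit d l).modifyHead (cur.reverse ++ ·) := by
  intro fuel
  induction fuel with
  | zero => intro l cur acc h; omega
  | succ fuel ih =>
    intro l cur acc h
    cases l with
    | nil => simp [PySem.Chars.splitOn.go, pvPsplit]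
    | cons c rest =>
      by_cases hc : c = d
      · subst hc
        rw [PySem.Chars.splitOn.go]
        simp only [List.isPrefixOf, beq_self_eq_true, Bool.true_and, if_pos,
          List.length_singleton, List.drop_one, List.tail_cons, List.drop_succ_cons, List.drop_zero]
        rw [ih rest [] (cur.reverse :: acc) (by simpa using Nat.lt_of_succ_lt_succ h)]
        obtain ⟨a, t, hat⟩ : ∃ a t, pvPsplit c rest = a :: t := by
          cases hps : pvPsplit c rest with
          | nil => exact absurd hps (pvPsplit_ne_nil c rest)
          | cons a t => exact ⟨a, t, rfl⟩
        simp [pvPsplit, hat]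
      · rw [PySem.Chars.splitOn.go]
        have hpre : [d].isPrefixOf (c :: rest) = false := by
          simp [List.isPrefixOf]; exact fun h' => hc h'.symm
        rw [hpre]
        simp only [if_neg Bool.false_ne_true]
        rw [ih rest (c :: cur) acc (by simpa using Nat.lt_of_succ_lt_succ h)]
        obtain ⟨a, t, hat⟩ : ∃ a t, pvPsplit d rest = a :: t := by
          cases hps : pvPsplit d rest with
          | nil => exact absurd hps (pvPsplit_ne_nil d rest)
          | cons a t => exact ⟨a, t, rfl⟩
        simp [pvPsplit, hat, hc]

lemma pvSplitOn_eq (d : Char) (cs : List Char) :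
    PySem.Chars.splitOn cs [d] = pvPsplit d cs := by
  rw [PySem.Chars.splitOn, pvGo_eq d (cs.length+1) cs [] [] (by omega)]
  obtain ⟨a, t, hat⟩ : ∃ a t, pvPsplit d cs = a :: t := by
    cases hps : pvPsplit d cs with
    | nil => exact absurd hps (pvPsplit_ne_nil d cs)
    | cons a t => exact ⟨a, t, rfl⟩
  simp [hat]

def pvScanOne (d : Char) (g : List Char → List Char) (cs : List Char) : List Char :=
  g (cs.takeWhile (fun x => x != d)) ++
    match h : cs.dropWhile (fun x => x != d) with
    | [] => []
    | _ :: r => d :: pvScanOne d g r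
termination_by cs.length
decreasing_by
  have h1 := List.length_dropWhile_le (p := fun x => x != d) (l := cs)
  rw [h] at h1; simp at h1; omega


lemma pvScanOne_eq (d : Char) (g : List Char → List Char) (cs : List Char) :
    pvScanOne d g cs = g (cs.takeWhile (fun x => x != d)) ++
      (match cs.dropWhile (fun x => x != d) with
       | [] => []
       | _ :: r => d :: pvScanOne d g r) := by
  rw [pvScanOne]
  congr 1
  split <;> rename_i heq <;> simp [heq]

lemma pvPsplit_struct (d : Char) (cs : List Char) :
    pvPsplit d cs = cs.takeWhile (fun x => x != d) ::
      (match cs.dropWhile (fun x => x != d) with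
       | [] => []
       | _ :: r => pvPsplit d r) := by
  induction cs with
  | nil => simp [pvPsplit]
  | cons c cs ih =>
    by_cases hc : c = d
    · subst hc
      simp [pvPsplit, List.takeWhile_cons, List.dropWhile_cons]
    · simp only [pvPsplit, if_neg hc, ih, List.takeWhile_cons, List.dropWhile_cons,
        bne_iff_ne, ne_eq, hc, not_false_eq_true, if_pos, List.modifyHead_cons]
      simp [hc]

lemma pvJoin_map_eq_scanOne (d : Char) (g : List Char → List Char) (cs : List Char) :
    PySem.Chars.join [d] ((pvPsplit d cs).map g) = pvScanOne d g cs := by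
  induction hn : cs.length using Nat.strong_induction_on generalizing cs with
  | _ n ih =>
    rw [pvScanOne, pvPsplit_struct]
    cases hdw : cs.dropWhile (fun x => x != d) with
    | nil => simp only [List.map_cons, List.map_nil, PySem.Chars.join_singleton, List.append_nil]
    | cons x r =>
      have hlen : r.length < cs.length := by
        have h1 := List.length_dropWhile_le (p := fun x => x != d) (l := cs)
        rw [hdw] at h1; simp at h1; omega
      simp only [List.map_cons]
      obtain ⟨a, t, hat⟩ : ∃ a t, pvPsplit d r = a :: t := by
        cases hps : pvPsplit d r with
        | nil => exact absurd hps (pvPsplit_ne_nil d r)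
        | cons a t => exact ⟨a, t, rfl⟩
      rw [hat, List.map_cons, PySem.Chars.join_cons_cons, ← List.map_cons, ← hat,
        ih r.length (by omega) r rfl]
      simp

lemma pvFix_nil : pvFix [] = [] := by decide

lemma pvTW_append (l r : List Char) :
    (l ++ '\n' :: r).takeWhile (fun x => !pvIsSep x) = l.takeWhile (fun x => !pvIsSep x) := by
  induction l with
  | nil => simp [pvIsSep]
  | cons a l ih => by_cases hpa : pvIsSep a <;> simp [List.takeWhile_cons, hpa, ih]

lemma pvDW_append (l r : List Char) :
    (l ++ '\n' :: r).dropWhile (fun x => !pvIsSep x) = l.dropWhile (fun x => !pvIsSep x) ++ '\n' :: r := by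
  induction l with
  | nil => simp [pvIsSep]
  | cons a l ih => by_cases hpa : pvIsSep a <;> simp [List.dropWhile_cons, hpa, ih]

lemma pvTW_no_nl (l : List Char) (h : ∀ c ∈ l, c ≠ '\n') :
    l.takeWhile (fun x => x != ' ') = l.takeWhile (fun x => !pvIsSep x) := by
  induction l with
  | nil => rfl
  | cons a l ih =>
    have ha : a ≠ '\n' := h a (by simp)
    by_cases hsp : a = ' '
    · simp [List.takeWhile_cons, hsp, pvIsSep]
    · simp [List.takeWhile_cons, hsp, pvIsSep, ha, ih (fun c hc => h c (by simp [hc]))]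

lemma pvDW_no_nl (l : List Char) (h : ∀ c ∈ l, c ≠ '\n') :
    l.dropWhile (fun x => x != ' ') = l.dropWhile (fun x => !pvIsSep x) := by
  induction l with
  | nil => rfl
  | cons a l ih =>
    have ha : a ≠ '\n' := h a (by simp)
    by_cases hsp : a = ' '
    · simp [List.dropWhile_cons, hsp, pvIsSep]
    · simp [List.dropWhile_cons, hsp, pvIsSep, ha, ih (fun c hc => h c (by simp [hc]))]

lemma pvDW_head_fail {p : Char → Bool} {l r : List Char} {x : Char}
    (h : l.dropWhile p = x :: r) : p x = false := by
  induction l with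
  | nil => simp at h
  | cons a l ih =>
    by_cases hpa : p a
    · rw [List.dropWhile_cons, if_pos hpa] at h; exact ih h
    · rw [List.dropWhile_cons, if_neg hpa] at h
      cases h; simpa using hpa

lemma pvScan_no_nl (l : List Char) (h : ∀ c ∈ l, c ≠ '\n') :
    pvScan l = pvScanOne ' ' pvFix l := by
  induction hn : l.length using Nat.strong_induction_on generalizing l with
  | _ n ih =>
    cases l with
    | nil => rw [pvScanOne_eq]; simp [pvScan, pvFix_nil]
    | cons c cs =>
      have hc_nl : c ≠ '\n' := h c (by simp)
      have hcs : ∀ x ∈ cs, x ≠ '\n' := fun x hx => h x (by simp [hx])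
      by_cases hsp : c = ' '
      · subst hsp
        rw [pvScanOne_eq]
        simp only [List.takeWhile_cons, bne_self_eq_false, if_false, pvFix_nil, List.nil_append,
          List.dropWhile_cons]
        rw [pvScan]
        simp only [pvIsSep, beq_self_eq_true, Bool.true_or, if_pos]
        congr 1
        exact ih cs.length (by simp [← hn]) cs hcs rfl
      · have hw : pvIsSep c = false := by simp [pvIsSep, hsp, hc_nl]
        have hcs' : (c != ' ') = true := by simp [hsp]
        rw [pvScan, pvScanOne_eq]
        simp only [hw, Bool.false_eq_true, if_false, List.takeWhile_cons, List.dropWhile_cons,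
          hcs', if_pos, pvTW_no_nl cs hcs, pvDW_no_nl cs hcs]
        congr 1
        have hdlen := List.length_dropWhile_le (p := fun x => !pvIsSep x) (l := cs)
        have hdmem : ∀ x ∈ cs.dropWhile (fun x => !pvIsSep x), x ≠ '\n' :=
          fun x hx => hcs x ((List.dropWhile_sublist _).mem hx)
        cases hD : cs.dropWhile (fun x => !pvIsSep x) with
        | nil => simp only [hD]; rw [pvScan]
        | cons x r =>
          simp only [hD]
          have hx : pvIsSep x = true := by simpa using pvDW_head_fail hD
          have hxsp : x = ' ' := by
            have := hdmem x (by simp [hD]); simp [pvIsSep, this] at hx; exact hx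
          subst hxsp
          rw [pvScan]
          simp only [pvIsSep, beq_self_eq_true, Bool.true_or, if_pos]
          congr 1
          have hrn : r.length < n := by rw [← hn]; rw [hD] at hdlen; simp at hdlen ⊢; omega
          exact ih r.length hrn r (fun y hy => hdmem y (by simp [hD, hy])) rfl

lemma pvScan_append_nl (l r : List Char) (h : ∀ c ∈ l, c ≠ '\n') :
    pvScan (l ++ '\n' :: r) = pvScanOne ' ' pvFix l ++ '\n' :: pvScan r := by
  induction hn : l.length using Nat.strong_induction_on generalizing l with
  | _ n ih =>
    cases l with
    | nil =>
      rw [pvScanOne_eq]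
      simp [pvScan, pvIsSep, pvFix_nil]
    | cons c cs =>
      have hc_nl : c ≠ '\n' := h c (by simp)
      have hcs : ∀ x ∈ cs, x ≠ '\n' := fun x hx => h x (by simp [hx])
      by_cases hsp : c = ' '
      · subst hsp
        rw [List.cons_append, pvScanOne]
        simp only [List.takeWhile_cons, bne_self_eq_false, if_false, pvFix_nil, List.nil_append,
          List.dropWhile_cons]
        rw [pvScan]
        simp only [pvIsSep, beq_self_eq_true, Bool.true_or, if_pos]
        rw [ih cs.length (by simp [← hn]) cs hcs rfl]
        rfl
      · have hw : pvIsSep c = false := by simp [pvIsSep, hsp, hc_nl]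
        have hcs' : (c != ' ') = true := by simp [hsp]
        rw [List.cons_append, pvScan, pvScanOne_eq]
        simp only [hw, Bool.false_eq_true, if_false, List.takeWhile_cons, List.dropWhile_cons,
          hcs', if_pos, pvTW_append, pvDW_append,
          pvTW_no_nl cs hcs, pvDW_no_nl cs hcs]
        have hdlen := List.length_dropWhile_le (p := fun x => !pvIsSep x) (l := cs)
        have hdmem : ∀ x ∈ cs.dropWhile (fun x => !pvIsSep x), x ≠ '\n' :=
          fun x hx => hcs x ((List.dropWhile_sublist _).mem hx)
        cases hD : cs.dropWhile (fun x => !pvIsSep x) with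
        | nil =>
          simp only [hD, List.nil_append]
          rw [pvScan]
          simp [pvIsSep]
        | cons x r' =>
          simp only [hD]
          have hx : pvIsSep x = true := by simpa using pvDW_head_fail hD
          have hxsp : x = ' ' := by
            have := hdmem x (by simp [hD]); simp [pvIsSep, this] at hx; exact hx
          subst hxsp
          rw [List.cons_append, pvScan]
          simp only [pvIsSep, beq_self_eq_true, Bool.true_or, if_pos]
          have hrn : r'.length < n := by rw [← hn]; rw [hD] at hdlen; simp at hdlen ⊢; omega
          rw [ih r'.length hrn r' (fun y hy => hdmem y (by simp [hD, hy])) rfl]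
          simp

lemma pvScanOne_compose (cs : List Char) :
    pvScanOne '\n' (fun l => pvScanOne ' ' pvFix l) cs = pvScan cs := by
  induction hn : cs.length using Nat.strong_induction_on generalizing cs with
  | _ n ih =>
    rw [pvScanOne_eq]
    have htw : ∀ c ∈ cs.takeWhile (fun x => x != '\n'), c ≠ '\n' := by
      intro c hc
      have := List.mem_takeWhile_imp hc
      simpa using this
    cases hD : cs.dropWhile (fun x => x != '\n') with
    | nil =>
      have hcs : cs = cs.takeWhile (fun x => x != '\n') := by
        conv_lhs => rw [← List.takeWhile_append_dropWhile (p := fun x => x != '\n') (l := cs)]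
        rw [hD, List.append_nil]
      simp only [hD, List.append_nil]
      conv_rhs => rw [hcs]
      exact (pvScan_no_nl _ htw).symm
    | cons x r =>
      have hx : x = '\n' := by
        have := pvDW_head_fail hD; simpa using this
      subst hx
      have hcs : cs = cs.takeWhile (fun x => x != '\n') ++ '\n' :: r := by
        conv_lhs => rw [← List.takeWhile_append_dropWhile (p := fun x => x != '\n') (l := cs)]
        rw [hD]
      have hdlen := List.length_dropWhile_le (p := fun x => x != '\n') (l := cs)
      have hrn : r.length < n := by rw [← hn]; rw [hD] at hdlen; simp at hdlen ⊢; omega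
      simp only [hD]
      conv_rhs => rw [hcs]
      rw [pvScan_append_nl _ _ htw]
      rw [ih r.length hrn r rfl]

-- ===== VERDICT (by name: the statement is the Claim_ definition above) =====
theorem convert_to_lower_spec : Claim_equal_convert_to_lower := by
  intro text _
  unfold Spec_convert_to_lower convert_to_lower convert_to_lower_alt pvConvLine
  congr 1
  rw [pvSplitOn_eq]
  calc PySem.Chars.join ['\n']
        ((pvPsplit '\n' text.toList).map
          (fun l => PySem.Chars.join [' '] ((PySem.Chars.splitOn l [' ']).map pvFix)))
      = PySem.Chars.join ['\n']
        ((pvPsplit '\n' text.toList).map (fun l => pvScanOne ' ' pvFix l)) := by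
        simp only [pvSplitOn_eq, pvJoin_map_eq_scanOne]
    _ = pvScanOne '\n' (fun l => pvScanOne ' ' pvFix l) text.toList :=
        pvJoin_map_eq_scanOne '\n' _ text.toList
    _ = pvScan text.toList := pvScanOne_compose text.toList
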